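-- pv_equiv track=rewrite | github.com/Blacknahil/a2sv_solutions | week3/all-divisions-with-the-highest-score-of-a-binary-array.py | maxScoreIndices
-- ===== SOURCE A (Python) =====
-- from typing import List
--
-- def maxScoreIndices(nums: List[int]) -> List[int]:
--     # [0,0,1,0]
--     #          ^
--     # zeros=3
--     # ones=0
--     # 1
--     # 2
--     # 3
--     # 2
--     # 3
--     # dont forget to append the last checking after n it should be n+1
--     ones=nums.count(1)
--     score=[]
--     zeros=0
--     for i in range(len(nums)):
--         score.append(ones + zeros)
--         if nums[i]==0:
--             zeros+=1
--         else:
--             ones-=1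
--     score.append(ones+ zeros)
--     ans=[]
--     _max=max(score)
--     for i in range(len(score)):
--         if _max==score[i]:
--             ans.append(i)
--     return ans
-- ===== SOURCE B (Python) =====
-- from typing import List
--
-- def maxScoreIndices(nums: List[int]) -> List[int]:
--     # Single online pass: running score with current-best tracking; no score array.
--     score = nums.count(1)
--     best = score
--     ans = [0]
--     for i, x in enumerate(nums, 1):
--         score += 1 if x == 0 else -1
--         if score > best:
--             best = score
--             ans = [i]
--         elif score == best:
--             ans.append(i)
--     return ans
-- ===== Notes on version B (the rewrite author's own statement) =====
-- stated objective: alternative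
-- what changed: B replaces A's build-a-score-array-then-max-then-rescan three-phase approach with one online pass that maintains a running score, the current best and a clear-and-append answer list, never materializing the score array.
import Mathlib
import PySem

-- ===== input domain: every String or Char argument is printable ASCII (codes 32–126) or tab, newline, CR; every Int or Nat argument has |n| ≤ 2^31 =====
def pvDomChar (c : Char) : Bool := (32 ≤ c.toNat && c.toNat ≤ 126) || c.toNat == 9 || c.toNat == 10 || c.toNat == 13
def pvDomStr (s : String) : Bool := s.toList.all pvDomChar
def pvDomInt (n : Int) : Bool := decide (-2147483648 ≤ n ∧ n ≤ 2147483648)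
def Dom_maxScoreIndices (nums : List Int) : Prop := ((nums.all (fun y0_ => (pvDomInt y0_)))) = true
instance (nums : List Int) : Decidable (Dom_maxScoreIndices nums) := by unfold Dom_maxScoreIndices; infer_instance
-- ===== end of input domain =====

-- B changes A's build-score-array / max / rescan into one online best-tracking pass (O(1) extra space).

-- ===== PORT A =====
-- A: count ones; loop appending ones+zeros to `score` while updating zeros/ones;
-- append the final score; take max; second loop collects indices where score[i] == max.
def maxScoreIndices (nums : List Int) : List Int :=
  let ones : Int := PySem.List.count nums 1
  let st := nums.foldl (fun (st : List Int × Int × Int) x =>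
      let score := st.1 ++ [st.2.1 + st.2.2]
      if x == 0 then (score, st.2.1, st.2.2 + 1) else (score, st.2.1 - 1, st.2.2))
    ([], ones, 0)
  let score := st.1 ++ [st.2.1 + st.2.2]
  -- Python's max(score): score has length len(nums)+1 > 0, so the default is never used
  let m := (PySem.List.max? score (fun y => y)).getD 0
  -- `for i in range(len(score)): if _max==score[i]` = the same index/value pairs as enumerate
  (PySem.List.enumerate score 0).foldl
    (fun ans p => if m == p.2 then ans ++ [p.1] else ans) []

-- ===== PORT B =====
-- B: one pass, running score with current best and clear-and-append answer list.
def maxScoreIndices_alt (nums : List Int) : List Int :=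
  let total : Int := PySem.List.count nums 1
  let st := (PySem.List.enumerate nums 1).foldl
    (fun (st : Int × Int × List Int) p =>
      let score := st.1 + (if p.2 == 0 then 1 else -1)
      if score > st.2.1 then (score, score, [p.1])
      else if score == st.2.1 then (score, st.2.1, st.2.2 ++ [p.1])
      else (score, st.2.1, st.2.2))
    (total, total, [0])
  st.2.2

-- ===== PRECONDITION & SPEC =====
def Spec_maxScoreIndices (nums : List Int) (out : List Int) : Prop := out = maxScoreIndices_alt nums
instance (nums : List Int) (out : List Int) : Decidable (Spec_maxScoreIndices nums out) := by unfold Spec_maxScoreIndices; infer_instance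

-- ===== CLAIM (what is proved, stated in full; the proofs are below) =====
def Claim_equal_maxScoreIndices : Prop := ∀ (nums : List Int), Dom_maxScoreIndices nums → Spec_maxScoreIndices nums (maxScoreIndices nums)

-- ===== LEMMAS AND PROOFS =====

/-- The score after reading one element. -/
def pvStep (s x : Int) : Int := s + (if x == 0 then 1 else -1)

/-- Scores after each element (tail of the score sequence starting from `s`). -/
def pvScan (s : Int) : List Int → List Int
  | [] => []
  | x :: xs => pvStep s x :: pvScan (pvStep s x) xs

/-- Indices (from `k`) of the entries of a list equal to `m`. -/
def pvCollect (m : Int) (k : Int) : List Int → List Int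
  | [] => []
  | s :: ss => (if m == s then [k] else []) ++ pvCollect m (k + 1) ss

theorem le_foldl_max (b : Int) (ss : List Int) : b ≤ ss.foldl max b := by
  induction ss generalizing b with
  | nil => simp
  | cons s ss ih => exact le_trans (le_max_left b s) (ih (max b s))

/-- A's first loop builds exactly the score sequence. -/
theorem a_loop_scores (xs : List Int) (acc : List Int) (ones zeros : Int) :
    (let r := xs.foldl (fun (st : List Int × Int × Int) x =>
        let score := st.1 ++ [st.2.1 + st.2.2]
        if x == 0 then (score, st.2.1, st.2.2 + 1) else (score, st.2.1 - 1, st.2.2))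
      (acc, ones, zeros)
     r.1 ++ [r.2.1 + r.2.2]) = acc ++ (ones + zeros) :: pvScan (ones + zeros) xs := by
  induction xs generalizing acc ones zeros with
  | nil => simp [pvScan]
  | cons x xs ih =>
    simp only [List.foldl_cons]
    by_cases hx : (x == 0) = true
    · rw [if_pos hx, ih]
      have h1 : ones + (zeros + 1) = (ones + zeros) + 1 := by ring
      rw [h1]
      simp [pvScan, pvStep, hx]
    · rw [if_neg hx, ih]
      have h1 : ones - 1 + zeros = (ones + zeros) + -1 := by ring
      rw [h1]
      simp [pvScan, pvStep, hx]

/-- A's second loop is `pvCollect`. -/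
theorem a_loop_collect (m : Int) (ss : List Int) (k : Int) (a : List Int) :
    (PySem.List.enumerate ss k).foldl
      (fun ans p => if m == p.2 then ans ++ [p.1] else ans) a
      = a ++ pvCollect m k ss := by
  induction ss generalizing k a with
  | nil => simp [PySem.List.enumerate_nil, pvCollect]
  | cons s ss ih =>
    simp only [PySem.List.enumerate_cons, List.foldl_cons, pvCollect]
    split <;> rw [ih] <;> simp

/-- B's loop: the answer is the collection of indices achieving the running max. -/
theorem b_loop (xs : List Int) (k s b : Int) (a : List Int) :
    ((PySem.List.enumerate xs k).foldl
      (fun (st : Int × Int × List Int) p =>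
        let score := st.1 + (if p.2 == 0 then 1 else -1)
        if score > st.2.1 then (score, score, [p.1])
        else if score == st.2.1 then (score, st.2.1, st.2.2 ++ [p.1])
        else (score, st.2.1, st.2.2))
      (s, b, a)).2.2
    = (if (pvScan s xs).foldl max b == b then a else [])
        ++ pvCollect ((pvScan s xs).foldl max b) k (pvScan s xs) := by
  induction xs generalizing k s b a with
  | nil => simp [PySem.List.enumerate_nil, pvScan, pvCollect]
  | cons x xs ih =>
    rw [PySem.List.enumerate_cons, List.foldl_cons]
    rw [show pvScan s (x :: xs) = pvStep s x :: pvScan (pvStep s x) xs from rfl]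
    rw [show (let score := (s, b, a).1 + (if (k, x).2 == 0 then 1 else -1)
        if score > (s, b, a).2.1 then (score, score, [(k, x).1])
        else if score == (s, b, a).2.1 then (score, (s, b, a).2.1, (s, b, a).2.2 ++ [(k, x).1])
        else (score, (s, b, a).2.1, (s, b, a).2.2))
        = (if pvStep s x > b then (pvStep s x, pvStep s x, [k])
           else if pvStep s x == b then (pvStep s x, b, a ++ [k])
           else (pvStep s x, b, a)) from rfl]
    rw [show (pvStep s x :: pvScan (pvStep s x) xs).foldl max b
        = (pvScan (pvStep s x) xs).foldl max (max b (pvStep s x)) from rfl]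
    rw [show pvCollect ((pvScan (pvStep s x) xs).foldl max (max b (pvStep s x))) k
          (pvStep s x :: pvScan (pvStep s x) xs)
        = (if (pvScan (pvStep s x) xs).foldl max (max b (pvStep s x)) == pvStep s x
             then [k] else [])
          ++ pvCollect ((pvScan (pvStep s x) xs).foldl max (max b (pvStep s x))) (k + 1)
              (pvScan (pvStep s x) xs) from rfl]
    rcases lt_trichotomy b (pvStep s x) with h | h | h
    · -- new strict maximum: best and answer reset
      rw [if_pos h, ih]
      rw [show max b (pvStep s x) = pvStep s x from max_eq_right (le_of_lt h)]
      have hM : pvStep s x ≤ (pvScan (pvStep s x) xs).foldl max (pvStep s x) :=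
        le_foldl_max _ _
      have hMb : ((pvScan (pvStep s x) xs).foldl max (pvStep s x) == b) = false := by
        simp only [beq_eq_false_iff_ne, ne_eq]; intro he; omega
      rw [hMb]
      simp
    · -- score equals best: index appended
      rw [if_neg (by omega : ¬ pvStep s x > b),
          if_pos (by simp [h.symm] : (pvStep s x == b) = true), ih]
      rw [show max b (pvStep s x) = b from by omega]
      by_cases hM : ((pvScan (pvStep s x) xs).foldl max b == b) = true
      · have h2 : ((pvScan (pvStep s x) xs).foldl max b == pvStep s x) = true := by
          simp only [beq_iff_eq] at hM ⊢; omega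
        rw [hM, h2]; simp
      · rw [Bool.not_eq_true] at hM
        have h2 : ((pvScan (pvStep s x) xs).foldl max b == pvStep s x) = false := by
          simp only [beq_eq_false_iff_ne, ne_eq] at hM ⊢; omega
        rw [hM, h2]; simp
    · -- score below best: nothing changes
      rw [if_neg (by omega : ¬ pvStep s x > b),
          if_neg (by simp only [beq_iff_eq]; omega : ¬ (pvStep s x == b) = true), ih]
      rw [show max b (pvStep s x) = b from by omega]
      have hM : b ≤ (pvScan (pvStep s x) xs).foldl max b := le_foldl_max _ _
      have h2 : ((pvScan (pvStep s x) xs).foldl max b == pvStep s x) = false := by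
        simp only [beq_eq_false_iff_ne, ne_eq]; omega
      rw [h2]
      simp

-- ===== VERDICT (by name: the statement is the Claim_ definition above) =====
theorem maxScoreIndices_spec : Claim_equal_maxScoreIndices := by
  intro nums _
  unfold Spec_maxScoreIndices
  simp only [maxScoreIndices, maxScoreIndices_alt]
  have hA := a_loop_scores nums [] ((PySem.List.count nums 1 : Int)) 0
  simp only [add_zero, List.nil_append] at hA
  simp only [hA, PySem.List.max?_id_cons, Option.getD_some]
  rw [a_loop_collect, b_loop]
  simp [pvCollect]
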